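-- pv_equiv track=rewrite | github.com/nishio/atcoder | past2/i.py | solve
-- ===== SOURCE A (Python) =====
-- def solve(N, AS):
--     ranks = [1] * (2 ** N)
--     winner = list(range(2 ** N))
--     next_rank = 2
--
--     while len(winner) > 2:
--         next_winner = []
--         for i in range(0, len(winner), 2):
--             a = winner[i]
--             b = winner[i + 1]
--             if AS[a] > AS[b]:
--                 next_winner.append(a)
--                 ranks[a] = next_rank
--             else:
--                 next_winner.append(b)
--                 ranks[b] = next_rank
--         winner = next_winner
--         next_rank += 1
--     return ranks
-- ===== SOURCE B (Python) =====
-- def solve(N, AS):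
--     size = 2 ** N
--     ranks = [1] * size
--     for level in range(1, N):
--         width = 2 ** level
--         for lo in range(0, size, width):
--             best = lo
--             for i in range(lo + 1, lo + width):
--                 if AS[i] >= AS[best]:
--                     best = i
--             ranks[best] = level + 1
--     return ranks
-- ===== Notes on version B (the rewrite author's own statement) =====
-- stated objective: alternative
-- what changed: B drops A's propagated winner list entirely: for each round level it rescans every 2**level-wide block with a direct rightmost-argmax scan and writes that champion's rank, instead of reducing a carried list of winners pairwise round by round.
import Mathlib
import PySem

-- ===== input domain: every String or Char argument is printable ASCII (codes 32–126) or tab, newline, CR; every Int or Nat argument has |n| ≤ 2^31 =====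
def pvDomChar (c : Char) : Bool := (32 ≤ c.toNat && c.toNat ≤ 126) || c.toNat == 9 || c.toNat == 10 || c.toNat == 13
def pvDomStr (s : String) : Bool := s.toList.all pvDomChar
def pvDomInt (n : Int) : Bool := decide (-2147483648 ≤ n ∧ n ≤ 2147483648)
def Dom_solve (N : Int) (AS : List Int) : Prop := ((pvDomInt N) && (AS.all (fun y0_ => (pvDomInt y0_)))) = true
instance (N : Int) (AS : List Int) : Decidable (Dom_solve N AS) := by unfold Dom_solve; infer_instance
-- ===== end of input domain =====

-- B drops A's propagated winner list: per round level it rescans each 2^level-wide block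
-- with a direct rightmost-argmax scan (alternative decomposition; no speed claim).

-- ===== PORT A =====
-- one round of A's while-loop: the for-loop over i in range(0, len(winner), 2);
-- state = (next_winner, ranks); all indices are in range under Pre_, so pyGetD/pySetD are exact
def roundA (AS : List Int) (winner : List Int) (ranks : List Int) (next_rank : Int) :
    List Int × List Int :=
  (PySem.List.pyRange 0 (PySem.List.len winner) 2).foldl
    (fun st i =>
      let a := PySem.List.pyGetD winner i 0
      let b := PySem.List.pyGetD winner (i + 1) 0
      if PySem.List.pyGetD AS a 0 > PySem.List.pyGetD AS b 0 then
        (st.1 ++ [a], PySem.List.pySetD st.2 a next_rank)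
      else
        (st.1 ++ [b], PySem.List.pySetD st.2 b next_rank))
    ([], ranks)

-- the while-loop; fuel = 2^N bounds the number of rounds (winner halves every round)
def loopA (AS : List Int) : Nat → List Int → List Int → Int → List Int
  | 0, _, ranks, _ => ranks
  | fuel + 1, winner, ranks, next_rank =>
    if 2 < winner.length then
      let p := roundA AS winner ranks next_rank
      loopA AS fuel p.1 p.2 (next_rank + 1)
    else ranks

-- 2 ** N is taken as 2 ^ N.toNat: Pre_ gives 0 ≤ N (Python raises for negative N)
def solve (N : Int) (AS : List Int) : List Int :=
  let size := 2 ^ N.toNat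
  loopA AS size ((List.range size).map (fun k => Int.ofNat k)) (List.replicate size 1) 2

-- ===== PORT B =====
def solve_alt (N : Int) (AS : List Int) : List Int :=
  let size : Nat := 2 ^ N.toNat
  (PySem.List.pyRange 1 N 1).foldl
    (fun ranks level =>
      let width : Int := 2 ^ level.toNat
      (PySem.List.pyRange 0 (size : Int) width).foldl
        (fun ranks lo =>
          let best :=
            (PySem.List.pyRange (lo + 1) (lo + width) 1).foldl
              (fun best i =>
                if PySem.List.pyGetD AS i 0 ≥ PySem.List.pyGetD AS best 0 then i else best)
              lo
          PySem.List.pySetD ranks best (level + 1))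
        ranks)
    (List.replicate size 1)

-- ===== PRECONDITION & SPEC =====
-- exactly where Python A returns: N ≥ 0 (2**N is a float for N < 0, so [1]*size raises),
-- and for N ≥ 2 round one reads AS[0..2^N-1], so 2^N ≤ len(AS) (stated as N ≤ log2 len)
def Pre_solve (N : Int) (AS : List Int) : Prop :=
  0 ≤ N ∧ (2 ≤ N → N.toNat ≤ Nat.log2 AS.length)
instance (N : Int) (AS : List Int) : Decidable (Pre_solve N AS) := by
  unfold Pre_solve; infer_instance
def pvWitness_solve : Int × List Int := (2, [3, 1, 2, 5])
def Spec_solve (N : Int) (AS : List Int) (out : List Int) : Prop := out = solve_alt N AS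
instance (N : Int) (AS : List Int) (out : List Int) : Decidable (Spec_solve N AS out) := by
  unfold Spec_solve; infer_instance

-- ===== CLAIM (what is proved, stated in full; the proofs are below) =====
def Claim_equal_solve : Prop :=
  ∀ (N : Int) (AS : List Int), Dom_solve N AS → Pre_solve N AS → Spec_solve N AS (solve N AS)

-- ===== LEMMAS AND PROOFS =====

-- AS[i] as both ports read it
def gA (AS : List Int) (i : Int) : Int := PySem.List.pyGetD AS i 0

-- B's rightmost-argmax scan, as a fold over an index list
def bf (AS : List Int) (x : Int) (l : List Int) : Int :=
  l.foldl (fun best i => if gA AS i ≥ gA AS best then i else best) x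

-- champion (rightmost argmax) of the k-th block of width 2^r
def blk (AS : List Int) (r k : Nat) : Int :=
  bf AS ((k : Int) * 2 ^ r)
    (PySem.List.pyRange ((k : Int) * 2 ^ r + 1) ((k : Int) * 2 ^ r + 2 ^ r) 1)

-- A's winner list after r rounds, for m surviving blocks
def W (AS : List Int) (r m : Nat) : List Int := (List.range m).map (fun k => blk AS r k)

-- the common write sequence of one round/level
def canon (AS : List Int) (r : Nat) (nr : Int) (m : Nat) (ranks : List Int) : List Int :=
  (List.range m).foldl (fun rk k => PySem.List.pySetD rk (blk AS r k) nr) ranks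

-- B's outer-loop body, named
def Fstep (AS : List Int) (size : Nat) (ranks : List Int) (level : Int) : List Int :=
  let width : Int := 2 ^ level.toNat
  (PySem.List.pyRange 0 (size : Int) width).foldl
    (fun ranks lo =>
      let best :=
        (PySem.List.pyRange (lo + 1) (lo + width) 1).foldl
          (fun best i =>
            if PySem.List.pyGetD AS i 0 ≥ PySem.List.pyGetD AS best 0 then i else best)
          lo
      PySem.List.pySetD ranks best (level + 1))
    ranks

lemma solve_alt_eq (N : Int) (AS : List Int) :
    solve_alt N AS =
      (PySem.List.pyRange 1 N 1).foldl (Fstep AS (2 ^ N.toNat))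
        (List.replicate (2 ^ N.toNat) 1) := rfl

lemma bf_cons (AS : List Int) (x j : Int) (l : List Int) :
    bf AS x (j :: l) = bf AS (if gA AS j ≥ gA AS x then j else x) l := rfl

lemma bf_append (AS : List Int) (x : Int) (l₁ l₂ : List Int) :
    bf AS x (l₁ ++ l₂) = bf AS (bf AS x l₁) l₂ := List.foldl_append

lemma bf_absorb (AS : List Int) (l : List Int) (x j : Int) :
    bf AS x (j :: l) = if gA AS (bf AS j l) ≥ gA AS x then bf AS j l else x := by
  induction l generalizing x j with
  | nil => simp [bf]
  | cons i l ih =>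
    rw [bf_cons, ih, ih j i]
    split_ifs with h1 h2 h3 h4 h5 <;> first | rfl | omega

-- range with a positive step over a multiple of the step
lemma rangeStep (s m : Nat) (hs : 0 < s) :
    PySem.List.pyRange 0 ((m * s : Nat) : Int) (s : Int)
      = (List.range m).map (fun k => ((k * s : Nat) : Int)) := by
  rw [PySem.List.pyRange_of_pos 0 _ (by exact_mod_cast hs)]
  rcases Nat.eq_zero_or_pos m with hm | hm
  · subst hm; simp
  · have hb : (0 : Int) < ((m * s : Nat) : Int) := by exact_mod_cast Nat.mul_pos hm hs
    have h1 : ((m * s : Nat) : Int) - 0 + (s : Int) - 1 = ((s : Int) - 1) + (m : Int) * (s : Int) := by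
      push_cast; ring
    rw [if_pos hb, h1, Int.add_mul_ediv_right _ _ (by exact_mod_cast hs.ne')]
    rw [Int.ediv_eq_zero_of_lt (by omega) (by omega)]
    simp only [zero_add, Int.toNat_natCast]
    exact List.map_congr_left fun k _ => by push_cast; ring

lemma blk_zero (AS : List Int) (k : Nat) : blk AS 0 k = (k : Int) := by
  unfold blk
  rw [PySem.List.pyRange_one_eq_nil (by simp)]
  simp [bf]

lemma blk_succ (AS : List Int) (r k : Nat) :
    blk AS (r + 1) k =
      if gA AS (blk AS r (2 * k)) > gA AS (blk AS r (2 * k + 1))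
      then blk AS r (2 * k) else blk AS r (2 * k + 1) := by
  have hw : (0 : Int) < 2 ^ r := by positivity
  unfold blk
  have e1 : ((2 * k : Nat) : Int) * 2 ^ r = (k : Int) * 2 ^ (r + 1) := by push_cast; ring
  have e2 : ((2 * k + 1 : Nat) : Int) * 2 ^ r = (k : Int) * 2 ^ (r + 1) + 2 ^ r := by
    push_cast; ring
  rw [e1, e2]
  set L : Int := (k : Int) * 2 ^ (r + 1) with hLdef
  have e3 : L + 2 ^ (r + 1) = L + 2 ^ r + 2 ^ r := by rw [pow_succ]; ring
  rw [e3,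
    PySem.List.pyRange_one_append (L + 1) (L + 2 ^ r) (L + 2 ^ r + 2 ^ r)
      (by omega) (by omega),
    bf_append, PySem.List.pyRange_one_cons (show L + 2 ^ r < L + 2 ^ r + 2 ^ r by omega),
    bf_absorb]
  split_ifs <;> first | rfl | omega

lemma length_W (AS : List Int) (r m : Nat) : (W AS r m).length = m := by
  simp [W]

lemma W_zero (AS : List Int) (m : Nat) :
    W AS 0 m = (List.range m).map (fun k => Int.ofNat k) := by
  unfold W
  refine List.map_congr_left ?_
  intro k _
  exact blk_zero AS k

lemma W_succ (AS : List Int) (r m : Nat) :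
    W AS r (m + 1) = W AS r m ++ [blk AS r m] := by
  simp [W, List.range_succ]

lemma canon_succ (AS : List Int) (r : Nat) (nr : Int) (m : Nat) (ranks : List Int) :
    canon AS r nr (m + 1) ranks
      = PySem.List.pySetD (canon AS r nr m ranks) (blk AS r m) nr := by
  simp [canon, List.range_succ]

lemma getD_W (AS : List Int) (r M j : Nat) (hj : j < M) :
    PySem.List.pyGetD (W AS r M) ((j : Nat) : Int) 0 = blk AS r j := by
  rw [PySem.List.pyGetD_natCast]
  exact PySem.List.getD_map_range _ _ _ _ hj

lemma roundA_W (AS : List Int) (M : Nat) (ranks : List Int) (r : Nat) (nr : Int) :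
    roundA AS (W AS r (2 * M)) ranks nr
      = (W AS (r + 1) M, canon AS (r + 1) nr M ranks) := by
  unfold roundA
  have hlen : PySem.List.len (W AS r (2 * M)) = ((M * 2 : Nat) : Int) := by
    simp [PySem.List.len_eq, length_W]; omega
  have h2 : (2 : Int) = ((2 : Nat) : Int) := by norm_num
  rw [hlen, h2, rangeStep 2 M (by norm_num), List.foldl_map]
  suffices aux : ∀ m : Nat, m ≤ M →
      (List.range m).foldl
        (fun st (k : Nat) =>
          let a := PySem.List.pyGetD (W AS r (2 * M)) (((k * 2 : Nat) : Int)) 0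
          let b := PySem.List.pyGetD (W AS r (2 * M)) (((k * 2 : Nat) : Int) + 1) 0
          if PySem.List.pyGetD AS a 0 > PySem.List.pyGetD AS b 0 then
            (st.1 ++ [a], PySem.List.pySetD st.2 a nr)
          else
            (st.1 ++ [b], PySem.List.pySetD st.2 b nr))
        ([], ranks)
      = (W AS (r + 1) m, canon AS (r + 1) nr m ranks) by
    exact aux M le_rfl
  intro m hm
  induction m with
  | zero => simp [W, canon]
  | succ m ih =>
    rw [List.range_succ, List.foldl_append, ih (by omega)]
    simp only [List.foldl_cons, List.foldl_nil]
    have ha : PySem.List.pyGetD (W AS r (2 * M)) (((m * 2 : Nat) : Int)) 0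
        = blk AS r (m * 2) := getD_W AS r (2 * M) (m * 2) (by omega)
    have hb1 : (((m * 2 : Nat) : Int)) + 1 = ((m * 2 + 1 : Nat) : Int) := by push_cast; ring
    have hb : PySem.List.pyGetD (W AS r (2 * M)) ((m * 2 + 1 : Nat) : Int) 0
        = blk AS r (m * 2 + 1) := getD_W AS r (2 * M) (m * 2 + 1) (by omega)
    simp only [ha, hb1, hb]
    have hx : (if PySem.List.pyGetD AS (blk AS r (m * 2)) 0 >
          PySem.List.pyGetD AS (blk AS r (m * 2 + 1)) 0 then
            (W AS (r + 1) m ++ [blk AS r (m * 2)],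
              PySem.List.pySetD (canon AS (r + 1) nr m ranks) (blk AS r (m * 2)) nr)
          else
            (W AS (r + 1) m ++ [blk AS r (m * 2 + 1)],
              PySem.List.pySetD (canon AS (r + 1) nr m ranks) (blk AS r (m * 2 + 1)) nr))
        = (W AS (r + 1) m ++ [blk AS (r + 1) m],
            PySem.List.pySetD (canon AS (r + 1) nr m ranks) (blk AS (r + 1) m) nr) := by
      have hbs := blk_succ AS r m
      rw [Nat.mul_comm 2 m] at hbs
      rw [hbs, gA, gA]
      split_ifs <;> rfl
    rw [hx, ← W_succ, ← canon_succ]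

lemma Fstep_eq (AS : List Int) (r M : Nat) (ranks : List Int) :
    Fstep AS (M * 2 ^ (r + 1)) ranks ((r : Int) + 1)
      = canon AS (r + 1) ((r : Int) + 2) M ranks := by
  unfold Fstep
  dsimp only
  have ht : ((r : Int) + 1).toNat = r + 1 := by omega
  have hwidth : ((2 : Int) ^ ((r : Int) + 1).toNat) = (((2 ^ (r + 1) : Nat)) : Int) := by
    rw [ht]; push_cast; ring
  rw [hwidth, rangeStep (2 ^ (r + 1)) M (by positivity), List.foldl_map]
  unfold canon
  refine List.foldl_ext _ _ _ (fun rk k hk => ?_)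
  have hlo : ((k * 2 ^ (r + 1) : Nat) : Int) = (k : Int) * 2 ^ (r + 1) := by push_cast; ring
  have hbest :
      (PySem.List.pyRange (((k * 2 ^ (r + 1) : Nat) : Int) + 1)
          (((k * 2 ^ (r + 1) : Nat) : Int) + (((2 ^ (r + 1) : Nat)) : Int)) 1).foldl
        (fun best i =>
          if PySem.List.pyGetD AS i 0 ≥ PySem.List.pyGetD AS best 0 then i else best)
        (((k * 2 ^ (r + 1) : Nat) : Int))
      = blk AS (r + 1) k := by
    unfold blk bf gA
    rw [hlo]
    norm_num
  rw [hbest, show (r : Int) + 1 + 1 = (r : Int) + 2 by ring]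

lemma main (AS : List Int) :
    ∀ (t r : Nat) (ranks : List Int) (fuel : Nat), t ≤ fuel →
      loopA AS fuel (W AS r (2 ^ (t + 1))) ranks ((r : Int) + 2)
        = (PySem.List.pyRange ((r : Int) + 1) ((r : Int) + (t : Int) + 1) 1).foldl
            (Fstep AS (2 ^ (r + t + 1))) ranks := by
  intro t
  induction t with
  | zero =>
    intro r ranks fuel _
    rw [PySem.List.pyRange_one_eq_nil (by norm_num)]
    cases fuel with
    | zero => rfl
    | succ f =>
      simp only [loopA]
      rw [if_neg (by rw [length_W]; norm_num)]
      rfl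
  | succ t ih =>
    intro r ranks fuel hfuel
    cases fuel with
    | zero => omega
    | succ f =>
      simp only [loopA]
      rw [if_pos (by
        rw [length_W]
        have h1 : (2 : Nat) ^ 2 ≤ 2 ^ (t + 1 + 1) := Nat.pow_le_pow_right (by norm_num) (by omega)
        omega)]
      rw [show (2 : Nat) ^ (t + 1 + 1) = 2 * 2 ^ (t + 1) by rw [pow_succ, Nat.mul_comm]]
      rw [roundA_W]
      have hnr : (r : Int) + 2 + 1 = ((r + 1 : Nat) : Int) + 2 := by push_cast; ring
      rw [hnr, ih (r + 1) (canon AS (r + 1) ((r : Int) + 2) (2 ^ (t + 1)) ranks) f (by omega)]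
      rw [PySem.List.pyRange_one_cons
        (show (r : Int) + 1 < (r : Int) + ((t + 1 : Nat) : Int) + 1 by push_cast; omega)]
      simp only [List.foldl_cons]
      have hsz : (2 : Nat) ^ (r + (t + 1) + 1) = 2 ^ (t + 1) * 2 ^ (r + 1) := by
        rw [← pow_add]; congr 1; omega
      rw [hsz, Fstep_eq]
      have h1 : ((r + 1 : Nat) : Int) + 1 = (r : Int) + 1 + 1 := by push_cast; ring
      have h2 : ((r + 1 : Nat) : Int) + (t : Int) + 1 = (r : Int) + ((t + 1 : Nat) : Int) + 1 := by
        push_cast; ring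
      have h3 : (2 : Nat) ^ (r + 1 + t + 1) = 2 ^ (t + 1) * 2 ^ (r + 1) := by
        rw [← pow_add]; congr 1; omega
      rw [h1, h2, h3]

-- ===== VERDICT (by name: the statement is the Claim_ definition above) =====
theorem solve_spec : Claim_equal_solve := by
  unfold Claim_equal_solve
  intro N AS _ hpre
  unfold Spec_solve
  obtain ⟨h0, -⟩ := hpre
  obtain ⟨n, rfl⟩ : ∃ n : Nat, N = (n : Int) := ⟨N.toNat, (Int.toNat_of_nonneg h0).symm⟩
  rw [solve_alt_eq]
  unfold solve
  dsimp only
  rw [Int.toNat_natCast]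
  rcases n with _ | n
  · rw [PySem.List.pyRange_one_eq_nil (by norm_num)]
    simp [loopA]
  rcases n with _ | t
  · rw [PySem.List.pyRange_one_eq_nil (by norm_num)]
    simp [loopA]
  · have hW : (List.range (2 ^ (t + 2))).map (fun k => Int.ofNat k) = W AS 0 (2 ^ (t + 1 + 1)) :=
      (W_zero AS _).symm
    have hfuel : t + 1 ≤ 2 ^ (t + 2) := by
      have h1 : t + 2 < 2 ^ (t + 2) := Nat.lt_two_pow_self
      omega
    have hm := main AS (t + 1) 0 (List.replicate (2 ^ (t + 2)) 1) (2 ^ (t + 2)) hfuel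
    rw [show ((0 : Nat) : Int) + 2 = 2 by norm_num] at hm
    rw [hW, hm]
    rw [show ((0 : Nat) : Int) + 1 = 1 by norm_num,
      show ((0 : Nat) : Int) + ((t + 1 : Nat) : Int) + 1 = ((t + 2 : Nat) : Int) by push_cast; ring,
      show 0 + (t + 1) + 1 = t + 2 by omega]
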